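-- pv_equiv track=rewrite | github.com/emiliovfx/Blender-PlaneMaker-add-on | broken/cis_bodies2pm.py | _pm_j_print_order
-- ===== SOURCE A (Python) =====
-- from typing import Dict, List, Tuple, Any
--
-- def _pm_j_print_order(points_per_ring: int = 18) -> List[int]:
--     order: List[int] = []
--     if points_per_ring > 0:
--         order.append(0)
--     if points_per_ring > 1:
--         order.append(1)
--     for j in range(10, points_per_ring):
--         order.append(j)
--     for j in range(2, 10):
--         if j < points_per_ring and j not in order:
--             order.append(j)
--     return order
-- ===== SOURCE B (Python) =====
-- from typing import List
--
-- def _pm_j_print_order(points_per_ring: int = 18) -> List[int]: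
--     return sorted(range(points_per_ring), key=lambda i: (2 <= i < 10, i))
-- ===== Notes on version B (the rewrite author's own statement) =====
-- stated objective: simpler
-- what changed: Replaces the append loops and the membership check by a single stable sort of range(points_per_ring) with key (2 <= i < 10, i), which puts indices 2..9 last in one expression.
import Mathlib
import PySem

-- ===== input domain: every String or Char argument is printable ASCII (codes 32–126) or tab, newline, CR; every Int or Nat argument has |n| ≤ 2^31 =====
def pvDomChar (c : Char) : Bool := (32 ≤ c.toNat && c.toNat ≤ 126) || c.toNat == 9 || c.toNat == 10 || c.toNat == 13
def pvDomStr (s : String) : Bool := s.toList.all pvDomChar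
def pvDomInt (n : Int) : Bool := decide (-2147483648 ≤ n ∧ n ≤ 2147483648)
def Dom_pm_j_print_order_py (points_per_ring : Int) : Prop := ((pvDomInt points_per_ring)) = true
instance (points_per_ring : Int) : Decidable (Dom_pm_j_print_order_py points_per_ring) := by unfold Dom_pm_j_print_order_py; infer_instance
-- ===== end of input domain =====

-- B replaces A's append loops and membership check by one stable sort of range(points_per_ring)
-- with the key (2 <= i < 10, i), which places indices 2..9 last; objective: simpler.


-- ===== PORT A =====
def pm_j_print_order_py (points_per_ring : Int) : List Int :=
  let order : List Int := []
  let order := if points_per_ring > 0 then order ++ [0] else order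
  let order := if points_per_ring > 1 then order ++ [1] else order
  let order := (PySem.List.pyRange 10 points_per_ring).foldl (fun acc j => acc ++ [j]) order
  let order := (PySem.List.pyRange 2 10).foldl
      (fun acc j => if j < points_per_ring ∧ j ∉ acc then acc ++ [j] else acc) order
  order

-- ===== PORT B =====
def pm_j_print_order_py_alt (points_per_ring : Int) : List Int :=
  PySem.List.sorted2 (PySem.List.pyRange 0 points_per_ring)
    (fun i => decide (2 ≤ i ∧ i < 10)) (fun i => i)

-- ===== PRECONDITION & SPEC =====
def Spec_pm_j_print_order_py (points_per_ring : Int) (out : List Int) : Prop := out = pm_j_print_order_py_alt points_per_ring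
instance (points_per_ring : Int) (out : List Int) : Decidable (Spec_pm_j_print_order_py points_per_ring out) := by unfold Spec_pm_j_print_order_py; infer_instance

-- ===== CLAIM =====
def Claim_equal_pm_j_print_order_py : Prop := ∀ (points_per_ring : Int), Dom_pm_j_print_order_py points_per_ring → Spec_pm_j_print_order_py points_per_ring (pm_j_print_order_py points_per_ring)

-- ===== LEMMAS AND PROOFS =====

def pvPre (p : Int) : List Int :=
  (if 0 < p then [(0:Int)] else []) ++ (if 1 < p then [(1:Int)] else []) ++ PySem.List.pyRange 10 p

def pvTarget (p : Int) : List Int := pvPre p ++ PySem.List.pyRange 2 (min p 10)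

theorem sorted2_eq_sorted_lex {α κ₁ κ₂ : Type} [LinearOrder κ₁] [LinearOrder κ₂]
    (xs : List α) (k1 : α → κ₁) (k2 : α → κ₂) :
    PySem.List.sorted2 xs k1 k2 = PySem.List.sorted xs (fun x => toLex (k1 x, k2 x)) := by
  have h : (fun a b : α => decide (k1 a < k1 b) || (!decide (k1 b < k1 a) && decide (k2 a < k2 b)))
      = (fun a b : α => decide (toLex (k1 a, k2 a) < toLex (k1 b, k2 b))) := by
    funext a b
    rcases lt_trichotomy (k1 a) (k1 b) with h | h | h
    · simp [Prod.Lex.lt_iff, h, lt_asymm h]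
    · simp [Prod.Lex.lt_iff, h]
    · simp [Prod.Lex.lt_iff, h]
      exact fun he _ => absurd he (ne_of_gt h)
  show List.foldl (fun acc x => PySem.List.insertBy
      (fun a b : α => decide (k1 a < k1 b) || (!decide (k1 b < k1 a) && decide (k2 a < k2 b))) x acc) [] xs
    = List.foldl (fun acc x => PySem.List.insertBy
      (fun a b : α => decide (toLex (k1 a, k2 a) < toLex (k1 b, k2 b))) x acc) [] xs
  rw [h]

theorem pv_mem_pre {p j : Int} (h : j ∈ pvPre p) : j = 0 ∨ j = 1 ∨ (10 ≤ j ∧ j < p) := by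
  simp only [pvPre, List.mem_append, PySem.List.mem_pyRange_one] at h
  rcases h with (h | h) | h
  · split_ifs at h <;> simp_all
  · split_ifs at h <;> simp_all
  · right; right; exact h

-- the second loop of A appends exactly the elements of [a, min p 10) to an accumulator
-- that contains nothing of [a, 10)
theorem pv_loop2 (p : Int) : ∀ (n : Nat) (a : Int) (acc : List Int), a + n = 10 →
    (∀ j ∈ acc, j < a ∨ 10 ≤ j) →
    (PySem.List.pyRange a 10).foldl
      (fun acc j => if j < p ∧ j ∉ acc then acc ++ [j] else acc) acc
    = acc ++ PySem.List.pyRange a (min p 10) := by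
  intro n
  induction n with
  | zero =>
    intro a acc ha _
    have h10 : a = 10 := by omega
    subst h10
    rw [PySem.List.pyRange_one_eq_nil (le_refl 10),
        PySem.List.pyRange_one_eq_nil (by omega : min p 10 ≤ 10)]
    simp
  | succ n ih =>
    intro a acc ha hacc
    have hlt : a < 10 := by omega
    rw [PySem.List.pyRange_one_cons hlt]
    simp only [List.foldl_cons]
    have hnot : a ∉ acc := fun hmem => by rcases hacc a hmem with h | h <;> omega
    by_cases hp : a < p
    · rw [if_pos ⟨hp, hnot⟩]
      rw [ih (a + 1) (acc ++ [a]) (by omega)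
        (by intro j hj; rcases List.mem_append.1 hj with hj | hj
            · rcases hacc j hj with h | h <;> omega
            · simp at hj; omega)]
      rw [PySem.List.pyRange_one_cons (by omega : a < min p 10)]
      simp
    · rw [if_neg (by tauto)]
      rw [ih (a + 1) acc (by omega)
        (by intro j hj; rcases hacc j hj with h | h <;> omega)]
      rw [PySem.List.pyRange_one_eq_nil (by omega : min p 10 ≤ a),
          PySem.List.pyRange_one_eq_nil (by omega : min p 10 ≤ a + 1)]

theorem pv_A_eq_target (p : Int) : pm_j_print_order_py p = pvTarget p := by
  show (PySem.List.pyRange 2 10).foldl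
      (fun acc j => if j < p ∧ j ∉ acc then acc ++ [j] else acc)
      ((PySem.List.pyRange 10 p).foldl (fun acc j => acc ++ [j])
        (if p > 1 then (if p > 0 then ([] : List Int) ++ [0] else []) ++ [1]
         else (if p > 0 then ([] : List Int) ++ [0] else [])))
    = pvTarget p
  rw [PySem.List.foldl_append_singleton]
  have hbase : ((if p > 1 then (if p > 0 then ([] : List Int) ++ [0] else []) ++ [1]
      else (if p > 0 then ([] : List Int) ++ [0] else [])) ++ PySem.List.pyRange 10 p) = pvPre p := by
    unfold pvPre
    split_ifs with h1 h2 h3 <;> simp_all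
  rw [hbase]
  exact pv_loop2 p 8 2 (pvPre p) (by omega)
    (fun j hj => by rcases pv_mem_pre hj with h | h | h <;> omega)

theorem pv_perm (p : Int) : (pvTarget p).Perm (PySem.List.pyRange 0 p) := by
  by_cases hp : p ≤ 0
  · rw [PySem.List.pyRange_one_eq_nil hp]
    unfold pvTarget pvPre
    rw [if_neg (by omega), if_neg (by omega),
        PySem.List.pyRange_one_eq_nil (by omega : p ≤ 10),
        PySem.List.pyRange_one_eq_nil (by omega : min p 10 ≤ 2)]
    simp
  · replace hp : 0 < p := by omega
    have h1 : PySem.List.pyRange 0 p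
        = PySem.List.pyRange 0 (min 2 p) ++ PySem.List.pyRange (min 2 p) (min 10 p)
          ++ PySem.List.pyRange (min 10 p) p := by
      rw [PySem.List.pyRange_one_append 0 (min 2 p) p (by omega) (by omega),
          PySem.List.pyRange_one_append (min 2 p) (min 10 p) p (by omega) (by omega),
          ← List.append_assoc]
    have e1 : PySem.List.pyRange 0 (min 2 p)
        = (if 0 < p then [(0:Int)] else []) ++ (if 1 < p then [(1:Int)] else []) := by
      rw [if_pos hp]
      by_cases h2 : 1 < p
      · rw [if_pos h2]
        have : min 2 p = 2 := by omega
        rw [this]; decide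
      · rw [if_neg h2]
        have : min 2 p = 1 := by omega
        rw [this]; decide
    have e2 : PySem.List.pyRange (min 2 p) (min 10 p) = PySem.List.pyRange 2 (min p 10) := by
      by_cases h2 : 2 ≤ p
      · have ha : min 2 p = 2 := by omega
        have hb : min 10 p = min p 10 := by omega
        rw [ha, hb]
      · rw [PySem.List.pyRange_one_eq_nil (by omega : min 10 p ≤ min 2 p),
            PySem.List.pyRange_one_eq_nil (by omega : min p 10 ≤ 2)]
    have e3 : PySem.List.pyRange (min 10 p) p = PySem.List.pyRange 10 p := by
      by_cases h2 : 10 ≤ p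
      · have : min 10 p = 10 := by omega
        rw [this]
      · rw [PySem.List.pyRange_one_eq_nil (by omega : p ≤ min 10 p),
            PySem.List.pyRange_one_eq_nil (by omega : p ≤ 10)]
    rw [h1, e1, e2, e3]
    unfold pvTarget pvPre
    simp only [List.append_assoc]
    exact ((List.perm_append_comm).append_left _).append_left _

theorem pv_key_lt {a b : Int}
    (h : (¬(2 ≤ a ∧ a < 10) ∧ (2 ≤ b ∧ b < 10)) ∨ (((2 ≤ a ∧ a < 10) ↔ (2 ≤ b ∧ b < 10)) ∧ a < b)) :
    (toLex (decide (2 ≤ a ∧ a < 10), a) : Lex (Bool × Int)) < toLex (decide (2 ≤ b ∧ b < 10), b) := by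
  rw [Prod.Lex.lt_iff]
  rcases h with ⟨h1, h2⟩ | ⟨h1, h2⟩
  · left; simp [Bool.lt_iff, h1, h2]
  · right; exact ⟨decide_eq_decide.2 h1, h2⟩

theorem pv_pairwise (p : Int) :
    (pvTarget p).Pairwise (fun x y : Int =>
      (toLex (decide (2 ≤ x ∧ x < 10), x) : Lex (Bool × Int)) < toLex (decide (2 ≤ y ∧ y < 10), y)) := by
  have K10 : (PySem.List.pyRange 10 p).Pairwise (fun x y : Int =>
      (toLex (decide (2 ≤ x ∧ x < 10), x) : Lex (Bool × Int)) < toLex (decide (2 ≤ y ∧ y < 10), y)) := by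
    refine (PySem.List.pairwise_lt_pyRange_one 10 p).imp_of_mem ?_
    intro a b ha hb hab
    rw [PySem.List.mem_pyRange_one] at ha hb
    exact pv_key_lt (Or.inr ⟨by omega, hab⟩)
  have K2 : (PySem.List.pyRange 2 (min p 10)).Pairwise (fun x y : Int =>
      (toLex (decide (2 ≤ x ∧ x < 10), x) : Lex (Bool × Int)) < toLex (decide (2 ≤ y ∧ y < 10), y)) := by
    refine (PySem.List.pairwise_lt_pyRange_one 2 (min p 10)).imp_of_mem ?_
    intro a b ha hb hab
    rw [PySem.List.mem_pyRange_one] at ha hb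
    exact pv_key_lt (Or.inr ⟨by omega, hab⟩)
  unfold pvTarget pvPre
  simp only [List.append_assoc, List.pairwise_append]
  refine ⟨?_, ⟨?_, ⟨K10, K2, ?_⟩, ?_⟩, ?_⟩
  · split_ifs <;> simp
  · split_ifs <;> simp
  · intro a ha b hb
    rw [PySem.List.mem_pyRange_one] at ha hb
    exact pv_key_lt (Or.inl ⟨by omega, by omega⟩)
  · intro a ha b hb
    have ha1 : a = 1 := by split_ifs at ha <;> simp_all
    subst ha1
    rcases List.mem_append.1 hb with hb | hb <;> rw [PySem.List.mem_pyRange_one] at hb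
    · exact pv_key_lt (Or.inr ⟨by omega, by omega⟩)
    · exact pv_key_lt (Or.inl ⟨by omega, by omega⟩)
  · intro a ha b hb
    have ha0 : a = 0 := by split_ifs at ha <;> simp_all
    subst ha0
    rcases List.mem_append.1 hb with hb | hb
    · have hb1 : b = 1 := by split_ifs at hb <;> simp_all
      subst hb1
      exact pv_key_lt (Or.inr ⟨by omega, by omega⟩)
    · rcases List.mem_append.1 hb with hb | hb <;> rw [PySem.List.mem_pyRange_one] at hb
      · exact pv_key_lt (Or.inr ⟨by omega, by omega⟩)
      · exact pv_key_lt (Or.inl ⟨by omega, by omega⟩)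

theorem pv_B_eq_target (p : Int) : pm_j_print_order_py_alt p = pvTarget p := by
  unfold pm_j_print_order_py_alt
  rw [sorted2_eq_sorted_lex]
  exact PySem.List.sorted_eq_of_perm_of_pairwise_lt _ _ _ (pv_perm p) (pv_pairwise p)

-- ===== VERDICT =====
theorem pm_j_print_order_py_spec : Claim_equal_pm_j_print_order_py := by
  intro p _
  unfold Spec_pm_j_print_order_py
  rw [pv_A_eq_target, pv_B_eq_target]
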